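-- pv_equiv track=rewrite | github.com/axxsxbxx/algorithm-solving | Programmers/weekly/4주차.py | solution
-- ===== SOURCE A (Python) =====
-- def solution(table, languages, preference):
--     table.sort()
--     selected = ''
--     max_score = 0
--
--     for job in table:
--         scores = job.split()
--         score = 0
--         for i in range(len(languages)):
--             if languages[i] in scores:
--                 score += (6 - scores.index(languages[i])) * preference[i]
--
--         if score > max_score:
--             selected = scores[0]
--             max_score = score
--
--     return selected
-- ===== SOURCE B (Python) =====
-- def solution(table, languages, preference):
--     # Note: like A, this sorts `table` in place (return-value equivalence only).
--     table.sort()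
--     # Precompute once, per language token, its total preference weight.
--     weight = {}
--     for lang, p in zip(languages, preference):
--         weight[lang] = weight.get(lang, 0) + p
--     best_name, best_score = '', 0
--     for job in table:
--         toks = job.split()
--         score = 0
--         # Inverted scoring: walk the job's tokens (first occurrences only)
--         # instead of scanning the token list once per language.
--         for j, t in enumerate(toks):
--             if t not in toks[:j]:
--                 score += (6 - j) * weight.get(t, 0)
--         if score > best_score:
--             best_name, best_score = toks[0], score
--     return best_name
-- ===== Notes on version B (the rewrite author's own statement) =====
-- stated objective: faster
-- what changed: A scores each job by looping over languages and rescanning the job's token list with `in`/`.index`; B inverts this: it precomputes a single language->summed-preference weight table from zip(languages, preference) before the job loop, then scores each job in one walk over its tokens (first occurrences only), adding (6-position)*weight.get(token,0).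
import Mathlib
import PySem

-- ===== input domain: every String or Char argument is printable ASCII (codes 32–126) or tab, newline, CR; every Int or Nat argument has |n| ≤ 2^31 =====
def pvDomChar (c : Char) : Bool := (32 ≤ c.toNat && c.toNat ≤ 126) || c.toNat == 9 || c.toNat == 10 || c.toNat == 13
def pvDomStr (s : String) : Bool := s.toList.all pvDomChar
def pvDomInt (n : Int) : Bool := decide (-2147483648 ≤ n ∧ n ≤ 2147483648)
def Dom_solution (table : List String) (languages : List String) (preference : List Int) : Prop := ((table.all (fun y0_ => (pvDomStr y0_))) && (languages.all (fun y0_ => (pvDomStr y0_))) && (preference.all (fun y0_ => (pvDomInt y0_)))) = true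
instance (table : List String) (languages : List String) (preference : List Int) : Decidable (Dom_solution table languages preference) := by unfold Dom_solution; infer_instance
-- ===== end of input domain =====

-- B inverts A's scoring: instead of scanning each job's token list once per language
-- (`in`/.index), it precomputes one language→total-preference weight table before the job
-- loop and walks each job's tokens once (first occurrences), adding (6-position)*weight.
-- Return-value equivalence only: both A and B sort `table` in place.

-- ===== PORT A =====
def solution (table : List String) (languages : List String) (preference : List Int) : String :=
  let t := PySem.List.sorted table (fun x => x) false        -- table.sort()
  let r := t.foldl (fun (st : String × Int) job =>
    let scores := PySem.Str.split₀ job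
    let score := (PySem.List.pyRange 0 (languages.length : Int) 1).foldl (fun sc i =>
      let lang := PySem.List.pyGetD languages i ""
      if lang ∈ scores then
        -- preference[i] raises IndexError when i ≥ len(preference); those inputs are excluded by Pre_solution
        sc + (6 - (((PySem.List.index? scores lang).getD 0 : Nat) : Int)) * PySem.List.pyGetD preference i 0
      else sc) 0
    -- scores[0]: the default is unreachable (score > st.2 ≥ 0 forces scores ≠ [])
    if score > st.2 then ((PySem.List.pyGet? scores 0).getD "", score) else st) ("", 0)
  r.1

-- ===== PORT B =====
-- weight = {}; for lang, p in zip(languages, preference): weight[lang] = weight.get(lang, 0) + p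
def solAltWeight (languages : List String) (preference : List Int) : PySem.Dict String Int :=
  (languages.zip preference).foldl
    (fun d lp => d.insert lp.1 (d.getD lp.1 0 + lp.2)) PySem.Dict.empty

-- for j, t in enumerate(toks): if t not in toks[:j]: score += (6 - j) * weight.get(t, 0)
def solAltScore (w : PySem.Dict String Int) (toks : List String) : Int :=
  (PySem.List.enumerate toks 0).foldl
    (fun sc jt =>
      if jt.2 ∈ PySem.List.slice toks none (some jt.1) then sc
      else sc + (6 - jt.1) * w.getD jt.2 0) 0

def solution_alt (table : List String) (languages : List String) (preference : List Int) : String :=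
  let t := PySem.List.sorted table (fun x => x) false        -- table.sort()
  let w := solAltWeight languages preference
  let r := t.foldl (fun (st : String × Int) job =>
    let toks := PySem.Str.split₀ job
    let score := solAltScore w toks
    -- toks[0]: the default is unreachable (score > st.2 ≥ 0 forces toks ≠ [])
    if score > st.2 then ((PySem.List.pyGet? toks 0).getD "", score) else st) ("", 0)
  r.1

-- ===== PRECONDITION & SPEC =====
-- Pre_ excludes exactly the inputs on which A raises IndexError: a preferred
-- language listed beyond len(preference) that occurs among the tokens of some job.
def Pre_solution (table : List String) (languages : List String) (preference : List Int) : Prop :=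
  ∀ lang ∈ languages.drop preference.length, ∀ job ∈ table, lang ∉ PySem.Str.split₀ job
instance (table : List String) (languages : List String) (preference : List Int) : Decidable (Pre_solution table languages preference) := by unfold Pre_solution; infer_instance

def pvWitness_solution : List String × List String × List Int :=
  (["java backend junior pizza 253", "python frontend senior chicken 100"], ["python", "java"], [5, 3])

def Spec_solution (table : List String) (languages : List String) (preference : List Int) (out : String) : Prop := out = solution_alt table languages preference
instance (table : List String) (languages : List String) (preference : List Int) (out : String) : Decidable (Spec_solution table languages preference out) := by unfold Spec_solution; infer_instance

-- ===== CLAIM (what is proved, stated in full; the proofs are below) =====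
def Claim_equal_solution : Prop := ∀ (table : List String) (languages : List String) (preference : List Int), Dom_solution table languages preference → Pre_solution table languages preference → Spec_solution table languages preference (solution table languages preference)

-- ===== LEMMAS AND PROOFS =====

-- A's `6 - scores.index(lang)` offset, as an Int
def idxZ (toks : List String) (l : String) : Int :=
  (((PySem.List.index? toks l).getD 0 : Nat) : Int)

-- one summand of B's per-job score, as a pure function of the enumerate pair
def contrib (toks : List String) (w : PySem.Dict String Int) (jt : Int × String) : Int :=
  if jt.2 ∈ toks.take jt.1.toNat then 0 else (6 - jt.1) * w.getD jt.2 0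

-- B's per-job score as a sum
def Bsum (toks : List String) (w : PySem.Dict String Int) : Int :=
  ((PySem.List.enumerate toks 0).map (contrib toks w)).sum

-- (L1) the solAltScore fold IS Bsum
theorem solAltScore_eq_Bsum (w : PySem.Dict String Int) (toks : List String) :
    solAltScore w toks = Bsum toks w := by
  unfold solAltScore Bsum
  have h1 : (PySem.List.enumerate toks 0).foldl
      (fun sc jt =>
        if jt.2 ∈ PySem.List.slice toks none (some jt.1) then sc
        else sc + (6 - jt.1) * w.getD jt.2 0) 0
      = (PySem.List.enumerate toks 0).foldl (fun sc jt => sc + contrib toks w jt) 0 := by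
    apply PySem.List.foldl_congr_mem
    intro acc jt hjt
    rcases (PySem.List.mem_enumerate_iff _ _ _).1 hjt with ⟨k, hk, rfl⟩
    simp only [zero_add]
    rw [PySem.List.slice_to toks (by positivity : (0:Int) ≤ ((k:Int)))]
    simp only [contrib]
    split_ifs <;> ring
  rw [h1, PySem.List.foldl_add, zero_add]

-- (L2) first-occurrence sum over a single key l: exactly one nonzero term, at index? toks l
theorem firstocc_single (l : String) (F : Int → Int) :
    ∀ (rest pre : List String),
      ((PySem.List.enumerate rest (pre.length : Int)).map
        (fun jt => if jt.2 ∈ (pre ++ rest).take jt.1.toNat then 0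
                   else if jt.2 = l then F jt.1 else 0)).sum
      = if l ∈ pre then 0
        else if l ∈ rest then F ((pre.length : Int) + (((PySem.List.index? rest l).getD 0 : Nat) : Int))
        else 0 := by
  intro rest
  induction rest with
  | nil => intro pre; simp [PySem.List.enumerate]
  | cons t rest' ih =>
    intro pre
    rw [PySem.List.enumerate_cons, List.map_cons, List.sum_cons]
    have htake2 : (pre ++ t :: rest').take ((pre.length : Int)).toNat = pre := by
      have : ((pre.length : Int)).toNat = pre.length := by simp
      rw [this, List.take_left]
    have hlen : (pre.length : Int) + 1 = ((pre ++ [t]).length : Int) := by simp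
    have happ : pre ++ t :: rest' = (pre ++ [t]) ++ rest' := by simp
    have hH : (if ((pre.length : Int), t).2 ∈ (pre ++ t :: rest').take ((pre.length : Int), t).1.toNat then (0:Int)
                   else if ((pre.length : Int), t).2 = l then F ((pre.length : Int), t).1 else 0)
        = (if t ∈ pre then 0 else if t = l then F (pre.length : Int) else 0) := by
      simp only [htake2]
    rw [hH, happ, hlen, ih (pre ++ [t])]
    by_cases hlp : l ∈ pre
    · have h1 : l ∈ pre ++ [t] := by simp [hlp]
      rw [if_pos h1, if_pos hlp, add_zero]
      split_ifs with h2 h3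
      · rfl
      · exact absurd (h3 ▸ hlp) h2
      · rfl
    · by_cases htl : t = l
      · subst htl
        have h1 : t ∈ pre ++ [t] := by simp
        rw [if_pos h1, add_zero, if_neg hlp, if_pos rfl, if_neg hlp,
            if_pos (List.mem_cons_self), PySem.List.index?_cons_self]
        simp
      · have h1 : l ∉ pre ++ [t] := by
          simp only [List.mem_append, List.mem_singleton]
          rintro (h | h); exact hlp h; exact htl h.symm
        have hhead : (if t ∈ pre then 0 else if t = l then F (pre.length : Int) else 0) = 0 := by
          simp [htl]
        rw [hhead, zero_add, if_neg h1, if_neg hlp,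
            PySem.List.index?_cons_of_ne rest' htl]
        by_cases hlr : l ∈ rest'
        · rw [if_pos hlr, if_pos (List.mem_cons_of_mem t hlr)]
          obtain ⟨k, hk⟩ := Option.isSome_iff_exists.1 ((PySem.List.index?_isSome_iff rest' l).2 hlr)
          rw [hk]
          simp only [Option.map_some, Option.getD_some]
          congr 1
          push_cast
          omega
        · have h2 : l ∉ t :: rest' := by
            intro h; rcases List.mem_cons.1 h with h | h
            exact htl h.symm; exact hlr h
          rw [if_neg hlr, if_neg h2]


-- (L3) Bsum is additive under one weight-table update at key l
theorem Bsum_insert (toks : List String) (w : PySem.Dict String Int) (l : String) (p : Int) :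
    Bsum toks (w.insert l (w.getD l 0 + p))
      = Bsum toks w + (if l ∈ toks then (6 - idxZ toks l) * p else 0) := by
  unfold Bsum
  have hpt : ∀ jt ∈ PySem.List.enumerate toks 0,
      contrib toks (w.insert l (w.getD l 0 + p)) jt
        = contrib toks w jt
          + (if jt.2 ∈ toks.take jt.1.toNat then 0 else if jt.2 = l then (6 - jt.1) * p else 0) := by
    intro jt _
    unfold contrib
    rw [PySem.Dict.getD_insert]
    split_ifs with h1 h2
    · ring
    · rw [h2]; ring
    · ring
  rw [List.map_congr_left hpt, PySem.List.sum_map_add_int]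
  congr 1
  have := firstocc_single l (fun j => (6 - j) * p) toks []
  simpa [idxZ] using this

-- (L4) Bsum through the whole weight-building loop
theorem Bsum_weightfold (toks : List String) :
    ∀ (lst : List (String × Int)) (w : PySem.Dict String Int),
      Bsum toks (lst.foldl (fun d lp => d.insert lp.1 (d.getD lp.1 0 + lp.2)) w)
        = Bsum toks w
          + (lst.map (fun lp => if lp.1 ∈ toks then (6 - idxZ toks lp.1) * lp.2 else 0)).sum := by
  intro lst
  induction lst with
  | nil => intro w; simp
  | cons lp lst' ih =>
    intro w
    rw [List.foldl_cons, ih, Bsum_insert, List.map_cons, List.sum_cons]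
    ring

-- (L5) the empty weight table scores 0
theorem Bsum_empty (toks : List String) : Bsum toks PySem.Dict.empty = 0 := by
  unfold Bsum
  have h : ∀ jt ∈ PySem.List.enumerate toks 0, contrib toks PySem.Dict.empty jt = 0 := by
    intro jt _; simp [contrib, PySem.Dict.getD_empty]
  rw [List.map_congr_left h]
  simp

-- (L6) A's per-index sum equals the zip sum (indices past len(preference) contribute 0 on both sides)
theorem A_sum_eq_zip (toks : List String) :
    ∀ (L : List String) (P : List Int),
      ((List.range L.length).map (fun k =>
        if L.getD k "" ∈ toks then (6 - idxZ toks (L.getD k "")) * P.getD k 0 else 0)).sum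
      = ((L.zip P).map (fun lp => if lp.1 ∈ toks then (6 - idxZ toks lp.1) * lp.2 else 0)).sum := by
  intro L
  induction L with
  | nil => intro P; simp
  | cons a L' ih =>
    intro P
    cases P with
    | nil =>
      simp only [List.zip_nil_right, List.map_nil, List.sum_nil]
      have h : ∀ k ∈ List.range (a :: L').length,
          (if (a :: L').getD k "" ∈ toks then (6 - idxZ toks ((a :: L').getD k "")) * ([] : List Int).getD k 0 else 0) = 0 := by
        intro k _; simp
      rw [List.map_congr_left h]
      simp
    | cons p P' =>
      simp only [List.length_cons, List.range_succ_eq_map, List.map_cons, List.map_map,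
        List.sum_cons, List.zip_cons_cons]
      refine congrArg₂ (· + ·) ?_ ?_
      · simp
      · rw [← ih P']
        apply congrArg List.sum
        apply List.map_congr_left
        intro k _
        simp [Function.comp, Nat.succ_eq_add_one]


-- per-job: A's score loop equals B's score of the prebuilt weight table
theorem score_eq (languages : List String) (preference : List Int) (toks : List String) :
    (PySem.List.pyRange 0 (languages.length : Int) 1).foldl (fun sc i =>
      let lang := PySem.List.pyGetD languages i ""
      if lang ∈ toks then
        sc + (6 - (((PySem.List.index? toks lang).getD 0 : Nat) : Int)) * PySem.List.pyGetD preference i 0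
      else sc) 0
    = solAltScore (solAltWeight languages preference) toks := by
  rw [solAltScore_eq_Bsum, solAltWeight, Bsum_weightfold, Bsum_empty, zero_add, ← A_sum_eq_zip]
  have h1 : (PySem.List.pyRange 0 (languages.length : Int) 1).foldl (fun sc i =>
      let lang := PySem.List.pyGetD languages i ""
      if lang ∈ toks then
        sc + (6 - (((PySem.List.index? toks lang).getD 0 : Nat) : Int)) * PySem.List.pyGetD preference i 0
      else sc) 0
    = (PySem.List.pyRange 0 (languages.length : Int) 1).foldl (fun sc i =>
        sc + (if PySem.List.pyGetD languages i "" ∈ toks then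
          (6 - idxZ toks (PySem.List.pyGetD languages i "")) * PySem.List.pyGetD preference i 0 else 0)) 0 := by
    apply PySem.List.foldl_congr_mem
    intro acc i _
    simp only [idxZ]
    split_ifs <;> ring
  rw [h1, PySem.List.foldl_add, zero_add, PySem.List.pyRange_one]
  simp only [sub_zero, Int.toNat_natCast, List.map_map]
  apply congrArg List.sum
  apply List.map_congr_left
  intro k hk
  simp only [Function.comp, zero_add, PySem.List.pyGetD_natCast]


-- main equality: the two pipelines agree on every input
theorem solution_eq_alt (table languages : List String) (preference : List Int) :
    solution table languages preference = solution_alt table languages preference := by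
  unfold solution solution_alt
  simp only []
  apply congrArg Prod.fst
  apply PySem.List.foldl_congr_mem
  intro st job _
  simp only [score_eq languages preference (PySem.Str.split₀ job)]

-- ===== VERDICT (by name: the statement is the Claim_ definition above) =====
theorem solution_spec : Claim_equal_solution := by
  intro table languages preference _ _
  unfold Spec_solution
  exact solution_eq_alt table languages preference
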